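-- pv_equiv track=rewrite | github.com/DevStarSJ/algorithmExercise | code/StringReducibility.py | applyRule
-- ===== SOURCE A (Python) =====
-- ruleSet = {"AB":"AA", "BA":"AA", "CB":"CC", "BC":"CC", "AA":"A", "CC":"C"};
--
-- keySet = ruleSet.keys()
--
-- def applyRule(s):
--
--     isChanged = True
--
--     while isChanged is True:
--         isChanged = False
--         i = 0
--         length = len(s)
--
--         while i <= length - 2:
--             sHead = s[:i] if i > 0 else ""
--             sRest = s[i:]
--             token = sRest[:2]
--
--             if token in keySet:
--                 s = sHead + sRest.replace(token, ruleSet[token], 1)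
--                 i += 2
--                 isChanged = True
--             else:
--                 i += 1
--     return s
-- ===== SOURCE B (Python) =====
-- # One left-to-right pass with a stack: each pair rule's replacement collapses
-- # to a single letter ('A' for the A-rules, 'C' for the C-rules), so adjacent
-- # reducible pairs are merged as characters arrive; confluence of the rule set
-- # makes this equal to A's repeated-scan rewriting.
-- PAIR = {"AB": "A", "BA": "A", "AA": "A",
--         "CB": "C", "BC": "C", "CC": "C"}
--
-- def applyRule(s):
--     stack = []
--     for ch in s:
--         while stack and stack[-1] + ch in PAIR:
--             ch = PAIR[stack.pop() + ch]
--         stack.append(ch)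
--     return "".join(stack)
-- ===== Notes on version B (the rewrite author's own statement) =====
-- stated objective: faster
-- what changed: Replaced A's repeated full rescans with string copies by a single left-to-right pass over the characters that keeps a stack and locally merges each reducible top pair (every rule's replacement collapses to one letter), which yields the same unique normal form by confluence of the rule set.
import Mathlib
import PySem

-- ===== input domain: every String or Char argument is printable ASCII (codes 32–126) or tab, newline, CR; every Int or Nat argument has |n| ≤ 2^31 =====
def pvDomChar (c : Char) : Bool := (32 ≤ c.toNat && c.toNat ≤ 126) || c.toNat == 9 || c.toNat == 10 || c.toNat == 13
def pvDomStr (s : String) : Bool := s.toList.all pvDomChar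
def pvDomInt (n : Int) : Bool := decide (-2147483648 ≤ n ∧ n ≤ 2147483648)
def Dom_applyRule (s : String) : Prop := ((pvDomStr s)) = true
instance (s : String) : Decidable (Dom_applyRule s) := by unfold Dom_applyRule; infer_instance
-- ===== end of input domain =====

-- B replaces A's repeated full rescans with string rebuilding by one stack pass
-- merging reducible top pairs (faster; equal by confluence of the rule set).


-- ===== PORT A =====
-- ruleSet = {"AB":"AA", …} as a PySem.Dict over the character lists of the keys/values
def ruleSet : PySem.Dict (List Char) (List Char) :=
  PySem.Dict.ofList
    [(['A','B'], ['A','A']), (['B','A'], ['A','A']), (['C','B'], ['C','C']),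
     (['B','C'], ['C','C']), (['A','A'], ['A']), (['C','C'], ['C'])]

def keySet : List (List Char) := PySem.Dict.keys ruleSet

-- sRest.replace(token, repl, 1): replace the FIRST occurrence only (hand port, exact:
-- scans left to right, substitutes at the first position where `old` is a prefix)
def pvReplaceOnce (s old new : List Char) : List Char :=
  if old.isPrefixOf s then new ++ s.drop old.length
  else match s with
    | [] => []
    | c :: t => c :: pvReplaceOnce t old new
termination_by s.length
decreasing_by simp_all

-- the inner `while i <= length - 2` loop of A; state (s, i, isChanged); `length` is the
-- stale pass-start length, exactly as in the Python
def pvInner (s : List Char) (i length : Int) (isChanged : Bool) : List Char × Bool :=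
  if i ≤ length - 2 then
    let sHead := if i > 0 then PySem.List.slice s none (some i) else []
    let sRest := PySem.List.slice s (some i) none
    let token := PySem.List.slice sRest none (some (2 : Int))
    if token ∈ keySet then
      pvInner (sHead ++ pvReplaceOnce sRest token (PySem.Dict.getD ruleSet token []))
        (i + 2) length true
    else
      pvInner s (i + 1) length isChanged
  else (s, isChanged)
termination_by (length - i).toNat
decreasing_by all_goals omega

-- termination measure for the outer `while isChanged` loop: every rule application
-- removes a 'B' (length kept) or shortens the string
def pvMu (s : List Char) : Nat := 2 * s.count 'B' + s.length

-- the outer `while isChanged is True` loop of A, with explicit fuel: pvMu strictly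
-- decreases on every changed pass (proved below in pvInner_mu), so `pvMu s + 1` units
-- of fuel always suffice and the fuel-0 branch is unreachable
def pvOuterFuel : Nat → List Char → List Char
  | 0, s => s
  | Nat.succ n, s =>
    let r := pvInner s 0 (s.length : Int) false
    if r.2 = true then pvOuterFuel n r.1 else r.1

def pvOuter (s : List Char) : List Char := pvOuterFuel (pvMu s + 1) s

def applyRule (s : String) : String := String.ofList (pvOuter s.toList)

-- ===== PORT B =====
-- PAIR = {"AB":"A", "BA":"A", "AA":"A", "CB":"C", "BC":"C", "CC":"C"}:
-- membership + lookup of the two-character literal dict, ported as a case function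
def pvCombine (a c : Char) : Option Char :=
  if (a = 'A' ∧ c = 'B') ∨ (a = 'B' ∧ c = 'A') ∨ (a = 'A' ∧ c = 'A') then some 'A'
  else if (a = 'C' ∧ c = 'B') ∨ (a = 'B' ∧ c = 'C') ∨ (a = 'C' ∧ c = 'C') then some 'C'
  else none

-- the `while stack and stack[-1] + ch in PAIR` loop; the stack is held top-first
-- (list head = Python stack[-1]), so pop/append work on the head
def pvPush : List Char → Char → List Char
  | [], ch => [ch]
  | a :: rest, ch =>
    match pvCombine a ch with
    | some d => pvPush rest d
    | none => ch :: a :: rest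

def applyRule_alt (s : String) : String :=
  String.ofList (List.reverse (List.foldl pvPush [] s.toList))

-- ===== PRECONDITION & SPEC =====
def Spec_applyRule (s : String) (out : String) : Prop := out = applyRule_alt s
instance (s : String) (out : String) : Decidable (Spec_applyRule s out) := by unfold Spec_applyRule; infer_instance

-- ===== CLAIM (what is proved, stated in full; the proofs are below) =====
def Claim_equal_applyRule : Prop := ∀ (s : String), Dom_applyRule s → Spec_applyRule s (applyRule s)

-- ===== LEMMAS AND PROOFS =====

-- the six rules as (left, right) pairs (used by the termination argument and the proofs)
def pvRules : List (List Char × List Char) :=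
  [(['A','B'], ['A','A']), (['B','A'], ['A','A']), (['C','B'], ['C','C']),
   (['B','C'], ['C','C']), (['A','A'], ['A']), (['C','C'], ['C'])]

theorem pvSix (tok : List Char) (h : tok ∈ keySet) :
    (tok, PySem.Dict.getD ruleSet tok []) ∈ pvRules := by
  have hk : keySet = [['A','B'],['B','A'],['C','B'],['B','C'],['A','A'],['C','C']] := by decide
  rw [hk] at h
  simp only [List.mem_cons, List.not_mem_nil, or_false] at h
  rcases h with h | h | h | h | h | h <;> subst h <;> decide

theorem pvKeyLen (tok : List Char) (h : tok ∈ keySet) : tok.length = 2 := by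
  have hk : keySet = [['A','B'],['B','A'],['C','B'],['B','C'],['A','A'],['C','C']] := by decide
  rw [hk] at h
  simp only [List.mem_cons, List.not_mem_nil, or_false] at h
  rcases h with h | h | h | h | h | h <;> subst h <;> rfl

-- in the matched branch of the inner loop: the string decomposes around the token,
-- and the Python update rebuilds it with the replacement in the token's place
theorem pvBranch (s : List Char) (i : Int) (hi : 0 ≤ i) (tok : List Char)
    (htok : tok = PySem.List.slice (PySem.List.slice s (some i) none) none (some (2 : Int)))
    (hlen : tok.length = 2) :
    s = s.take i.toNat ++ tok ++ s.drop (i.toNat + 2) ∧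
    ∀ r, (if i > 0 then PySem.List.slice s none (some i) else []) ++
        pvReplaceOnce (PySem.List.slice s (some i) none) tok r
      = s.take i.toNat ++ r ++ s.drop (i.toNat + 2) := by
  have hrest : PySem.List.slice s (some i) none = s.drop i.toNat := PySem.List.slice_from s hi
  have htok' : tok = (s.drop i.toNat).take 2 := by
    rw [htok, hrest, PySem.List.slice_to _ (by norm_num : (0:Int) ≤ 2)]
    rfl
  have hdec : s.drop i.toNat = tok ++ s.drop (i.toNat + 2) := by
    conv_lhs => rw [← List.take_append_drop 2 (s.drop i.toNat)]
    rw [← htok', List.drop_drop]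
  constructor
  · conv_lhs => rw [← List.take_append_drop i.toNat s]
    rw [hdec, List.append_assoc]
  · intro r
    have hhead : (if i > 0 then PySem.List.slice s none (some i) else []) = s.take i.toNat := by
      by_cases h0 : i > 0
      · rw [if_pos h0, PySem.List.slice_to s hi]
      · have : i = 0 := by omega
        subst this; simp
    have hpref : tok.isPrefixOf (s.drop i.toNat) = true := by
      rw [List.isPrefixOf_iff_prefix, htok']; exact List.take_prefix 2 _
    rw [hhead, hrest, pvReplaceOnce.eq_def, if_pos hpref, hlen, List.drop_drop,
      List.append_assoc]

-- conditional unfoldings of the inner loop (the three branches of one iteration)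
theorem pvInner_eq_key (s : List Char) (i L : Int) (fl : Bool) (hi : 0 ≤ i)
    (h1 : i ≤ L - 2) (tok : List Char)
    (htok : tok = PySem.List.slice (PySem.List.slice s (some i) none) none (some (2 : Int)))
    (hk : tok ∈ keySet) :
    pvInner s i L fl =
      pvInner (s.take i.toNat ++ PySem.Dict.getD ruleSet tok [] ++ s.drop (i.toNat + 2))
        (i + 2) L true := by
  obtain ⟨_, hrepl⟩ := pvBranch s i hi tok htok (pvKeyLen tok hk)
  rw [pvInner, if_pos h1]
  simp only []
  rw [← htok, if_pos hk, hrepl]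

theorem pvInner_eq_neg (s : List Char) (i L : Int) (fl : Bool) (h1 : i ≤ L - 2)
    (tok : List Char)
    (htok : tok = PySem.List.slice (PySem.List.slice s (some i) none) none (some (2 : Int)))
    (hk : tok ∉ keySet) :
    pvInner s i L fl = pvInner s (i + 1) L fl := by
  rw [pvInner, if_pos h1]
  simp only []
  rw [← htok, if_neg hk]

theorem pvInner_eq_stop (s : List Char) (i L : Int) (fl : Bool) (h1 : ¬ i ≤ L - 2) :
    pvInner s i L fl = (s, fl) := by
  rw [pvInner, if_neg h1]

theorem pvRules_mu (l r : List Char) (h : (l, r) ∈ pvRules) :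
    2 * r.count 'B' + r.length < 2 * l.count 'B' + l.length := by
  simp only [pvRules, List.mem_cons, List.not_mem_nil, or_false, Prod.mk.injEq] at h
  rcases h with ⟨h1, h2⟩ | ⟨h1, h2⟩ | ⟨h1, h2⟩ | ⟨h1, h2⟩ | ⟨h1, h2⟩ | ⟨h1, h2⟩ <;>
    subst h1 <;> subst h2 <;> decide

theorem pvInner_mu_aux (L : Int) (n : Nat) :
    ∀ (s : List Char) (i : Int) (fl : Bool), (L - i).toNat ≤ n → 0 ≤ i →
      pvMu (pvInner s i L fl).1 ≤ pvMu s ∧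
        ((pvInner s i L fl).2 = true → fl = true ∨ pvMu (pvInner s i L fl).1 < pvMu s) := by
  induction n with
  | zero =>
    intro s i fl hn hi
    rw [pvInner_eq_stop s i L fl (by omega)]
    exact ⟨le_refl _, fun h => Or.inl h⟩
  | succ n ih =>
    intro s i fl hn hi
    by_cases h1 : i ≤ L - 2
    · set tok := PySem.List.slice (PySem.List.slice s (some i) none) none (some (2 : Int))
        with htok
      by_cases hk : tok ∈ keySet
      · rw [pvInner_eq_key s i L fl hi h1 tok htok hk]
        have hsix := pvSix tok hk
        obtain ⟨hs, _⟩ := pvBranch s i hi tok htok (pvKeyLen tok hk)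
        have hmu : pvMu (s.take i.toNat ++ PySem.Dict.getD ruleSet tok [] ++
            s.drop (i.toNat + 2)) < pvMu s := by
          conv_rhs => rw [hs]
          have := pvRules_mu tok (PySem.Dict.getD ruleSet tok []) hsix
          simp only [pvMu, List.count_append, List.length_append]
          omega
        have ih' := ih (s.take i.toNat ++ PySem.Dict.getD ruleSet tok [] ++ s.drop (i.toNat + 2)) (i + 2) true (by omega) (by omega)
        exact ⟨le_trans ih'.1 (le_of_lt hmu),
          fun _ => Or.inr (lt_of_le_of_lt ih'.1 hmu)⟩
      · rw [pvInner_eq_neg s i L fl h1 tok htok hk]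
        exact ih s (i + 1) fl (by omega) (by omega)
    · rw [pvInner_eq_stop s i L fl h1]
      exact ⟨le_refl _, fun h => Or.inl h⟩

theorem pvInner_mu (s : List Char) (i L : Int) (fl : Bool) (hi : 0 ≤ i) :
    pvMu (pvInner s i L fl).1 ≤ pvMu s ∧
      ((pvInner s i L fl).2 = true → fl = true ∨ pvMu (pvInner s i L fl).1 < pvMu s) :=
  pvInner_mu_aux L (L - i).toNat s i fl (le_refl _) hi


-- key-free strings (no adjacent pair is a rule key), left-to-right
def pvKF : List Char → Prop
  | a :: c :: t => pvCombine a c = none ∧ pvKF (c :: t)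
  | _ => True

-- key-free stacks (top-first: head is the LAST character)
def pvKFR : List Char → Prop
  | c :: a :: t => pvCombine a c = none ∧ pvKFR (a :: t)
  | _ => True

def pvNorm (w : List Char) : List Char := List.foldl pvPush [] w

def pvPA (c : Char) : Bool := c == 'A' || c == 'B'
def pvPC (c : Char) : Bool := c == 'C' || c == 'B'

theorem pvPush_A (st : List Char) : pvPush st 'A' = 'A' :: st.dropWhile pvPA := by
  induction st with
  | nil => rfl
  | cons a t ih =>
    by_cases hA : a = 'A'
    · subst hA; simp [pvPush, pvCombine, ih, pvPA]
    · by_cases hB : a = 'B'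
      · subst hB; simp [pvPush, pvCombine, ih, pvPA]
      · simp [pvPush, pvCombine, hA, hB, pvPA]

theorem pvPush_C (st : List Char) : pvPush st 'C' = 'C' :: st.dropWhile pvPC := by
  induction st with
  | nil => rfl
  | cons a t ih =>
    by_cases hC : a = 'C'
    · subst hC; simp [pvPush, pvCombine, ih, pvPC]
    · by_cases hB : a = 'B'
      · subst hB; simp [pvPush, pvCombine, ih, pvPC]
      · simp [pvPush, pvCombine, hC, hB, pvPC]

theorem pvDropWhile_idem (p : Char → Bool) (l : List Char) :
    List.dropWhile p (List.dropWhile p l) = List.dropWhile p l := by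
  induction l with
  | nil => rfl
  | cons a t ih =>
    by_cases h : p a = true
    · simp [h, ih]
    · simp [h]

theorem pvKF_tail (c : Char) (t : List Char) (h : pvKF (c :: t)) : pvKF t := by
  cases t with
  | nil => trivial
  | cons x t' => exact h.2

theorem pvKFR_tail (c : Char) (t : List Char) (h : pvKFR (c :: t)) : pvKFR t := by
  cases t with
  | nil => trivial
  | cons x t' => exact h.2

theorem pvKFR_push (st : List Char) (c : Char) (h : pvKFR st) : pvKFR (pvPush st c) := by
  induction st generalizing c with
  | nil => simp [pvPush, pvKFR]
  | cons a t ih =>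
    rw [pvPush]
    cases hc : pvCombine a c with
    | some d => exact ih d (pvKFR_tail a t h)
    | none => exact ⟨hc, h⟩

theorem pvPA_false_of (x : Char) (h : pvCombine x 'A' = none) : pvPA x = false := by
  by_cases hA : x = 'A'
  · subst hA; simp [pvCombine] at h
  · by_cases hB : x = 'B'
    · subst hB; simp [pvCombine] at h
    · simp [pvPA, hA, hB]

theorem pvPC_false_of (x : Char) (h : pvCombine x 'C' = none) : pvPC x = false := by
  by_cases hC : x = 'C'
  · subst hC; simp [pvCombine] at h
  · by_cases hB : x = 'B'
    · subst hB; simp [pvCombine] at h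
    · simp [pvPC, hC, hB]

theorem pvKFR_dropA_eq (t : List Char) (h : pvKFR ('A' :: t)) : List.dropWhile pvPA t = t := by
  cases t with
  | nil => rfl
  | cons x t' => rw [List.dropWhile_cons, if_neg (by simp [pvPA_false_of x h.1])]

theorem pvKFR_dropC_eq (t : List Char) (h : pvKFR ('C' :: t)) : List.dropWhile pvPC t = t := by
  cases t with
  | nil => rfl
  | cons x t' => rw [List.dropWhile_cons, if_neg (by simp [pvPC_false_of x h.1])]

theorem pvDropA_pushB (st : List Char) (h : pvKFR st) :
    List.dropWhile pvPA (pvPush st 'B') = List.dropWhile pvPA st := by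
  cases st with
  | nil => rfl
  | cons a t =>
    by_cases hA : a = 'A'
    · subst hA
      rw [show pvPush ('A' :: t) 'B' = pvPush t 'A' by simp [pvPush, pvCombine],
        pvPush_A t]
      try simp [pvPA, pvDropWhile_idem]
    · by_cases hB : a = 'B'
      · subst hB
        rw [show pvPush ('B' :: t) 'B' = 'B' :: 'B' :: t by simp [pvPush, pvCombine]]
        try simp [pvPA]
      · by_cases hC : a = 'C'
        · subst hC
          rw [show pvPush ('C' :: t) 'B' = pvPush t 'C' by simp [pvPush, pvCombine],
            pvPush_C t, pvKFR_dropC_eq t h]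
          try simp [pvPA]
        · rw [show pvPush (a :: t) 'B' = 'B' :: a :: t by
              simp [pvPush, pvCombine, hA, hB, hC]]
          try simp [pvPA, hA, hB]

theorem pvDropC_pushB (st : List Char) (h : pvKFR st) :
    List.dropWhile pvPC (pvPush st 'B') = List.dropWhile pvPC st := by
  cases st with
  | nil => rfl
  | cons a t =>
    by_cases hC : a = 'C'
    · subst hC
      rw [show pvPush ('C' :: t) 'B' = pvPush t 'C' by simp [pvPush, pvCombine],
        pvPush_C t]
      try simp [pvPC, pvDropWhile_idem]
    · by_cases hB : a = 'B'
      · subst hB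
        rw [show pvPush ('B' :: t) 'B' = 'B' :: 'B' :: t by simp [pvPush, pvCombine]]
        try simp [pvPC]
      · by_cases hA : a = 'A'
        · subst hA
          rw [show pvPush ('A' :: t) 'B' = pvPush t 'A' by simp [pvPush, pvCombine],
            pvPush_A t, pvKFR_dropA_eq t h]
          try simp [pvPC]
        · rw [show pvPush (a :: t) 'B' = 'B' :: a :: t by
              simp [pvPush, pvCombine, hA, hB, hC]]
          try simp [pvPC]

-- the six rules, each as an equality of stack effects (on key-free stacks)
theorem pvRuleAA (st : List Char) : pvPush (pvPush st 'A') 'A' = pvPush st 'A' := by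
  rw [pvPush_A st]
  rw [show pvPush ('A' :: List.dropWhile pvPA st) 'A' = pvPush (List.dropWhile pvPA st) 'A' by
    simp [pvPush, pvCombine]]
  rw [pvPush_A (List.dropWhile pvPA st), pvDropWhile_idem]

theorem pvRuleCC (st : List Char) : pvPush (pvPush st 'C') 'C' = pvPush st 'C' := by
  rw [pvPush_C st]
  rw [show pvPush ('C' :: List.dropWhile pvPC st) 'C' = pvPush (List.dropWhile pvPC st) 'C' by
    simp [pvPush, pvCombine]]
  rw [pvPush_C (List.dropWhile pvPC st), pvDropWhile_idem]

theorem pvRuleAB (st : List Char) : pvPush (pvPush st 'A') 'B' = pvPush (pvPush st 'A') 'A' := by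
  rw [pvPush_A st]
  rw [show pvPush ('A' :: List.dropWhile pvPA st) 'B' = pvPush (List.dropWhile pvPA st) 'A' by
    simp [pvPush, pvCombine]]
  rw [show pvPush ('A' :: List.dropWhile pvPA st) 'A' = pvPush (List.dropWhile pvPA st) 'A' by
    simp [pvPush, pvCombine]]

theorem pvRuleCB (st : List Char) : pvPush (pvPush st 'C') 'B' = pvPush (pvPush st 'C') 'C' := by
  rw [pvPush_C st]
  rw [show pvPush ('C' :: List.dropWhile pvPC st) 'B' = pvPush (List.dropWhile pvPC st) 'C' by
    simp [pvPush, pvCombine]]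
  rw [show pvPush ('C' :: List.dropWhile pvPC st) 'C' = pvPush (List.dropWhile pvPC st) 'C' by
    simp [pvPush, pvCombine]]

theorem pvRuleBA (st : List Char) (h : pvKFR st) :
    pvPush (pvPush st 'B') 'A' = pvPush (pvPush st 'A') 'A' := by
  rw [pvPush_A (pvPush st 'B'), pvDropA_pushB st h, pvRuleAA, pvPush_A st]

theorem pvRuleBC (st : List Char) (h : pvKFR st) :
    pvPush (pvPush st 'B') 'C' = pvPush (pvPush st 'C') 'C' := by
  rw [pvPush_C (pvPush st 'B'), pvDropC_pushB st h, pvRuleCC, pvPush_C st]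

theorem pvKFR_foldl (w st : List Char) (h : pvKFR st) : pvKFR (List.foldl pvPush st w) := by
  induction w generalizing st with
  | nil => exact h
  | cons c w' ih => exact ih (pvPush st c) (pvKFR_push st c h)

-- one rewrite step anywhere in the string does not change the stack normal form
theorem pvNormStep (x y l r : List Char) (h : (l, r) ∈ pvRules) :
    pvNorm (x ++ l ++ y) = pvNorm (x ++ r ++ y) := by
  have hst : pvKFR (List.foldl pvPush [] x) := pvKFR_foldl x [] (by simp [pvKFR])
  unfold pvNorm
  rw [List.foldl_append, List.foldl_append, List.foldl_append, List.foldl_append]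
  congr 1
  simp only [pvRules, List.mem_cons, List.not_mem_nil, or_false, Prod.mk.injEq] at h
  rcases h with ⟨h1, h2⟩ | ⟨h1, h2⟩ | ⟨h1, h2⟩ | ⟨h1, h2⟩ | ⟨h1, h2⟩ | ⟨h1, h2⟩ <;>
      subst h1 <;> subst h2 <;> simp only [List.foldl_cons, List.foldl_nil]
  · exact pvRuleAB _
  · exact pvRuleBA _ hst
  · exact pvRuleCB _
  · exact pvRuleBC _ hst
  · exact pvRuleAA _
  · exact pvRuleCC _

theorem pvInner_norm_aux (L : Int) (n : Nat) :
    ∀ (s : List Char) (i : Int) (fl : Bool), (L - i).toNat ≤ n → 0 ≤ i →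
      pvNorm (pvInner s i L fl).1 = pvNorm s := by
  induction n with
  | zero =>
    intro s i fl hn hi
    rw [pvInner_eq_stop s i L fl (by omega)]
  | succ n ih =>
    intro s i fl hn hi
    by_cases h1 : i ≤ L - 2
    · set tok := PySem.List.slice (PySem.List.slice s (some i) none) none (some (2 : Int))
        with htok
      by_cases hk : tok ∈ keySet
      · rw [pvInner_eq_key s i L fl hi h1 tok htok hk]
        have hsix := pvSix tok hk
        obtain ⟨hs, _⟩ := pvBranch s i hi tok htok (pvKeyLen tok hk)
        rw [ih (s.take i.toNat ++ PySem.Dict.getD ruleSet tok [] ++ s.drop (i.toNat + 2)) (i + 2) true (by omega) (by omega)]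
        conv_rhs => rw [hs]
        exact (pvNormStep _ _ _ _ hsix).symm
      · rw [pvInner_eq_neg s i L fl h1 tok htok hk]
        exact ih s (i + 1) fl (by omega) (by omega)
    · rw [pvInner_eq_stop s i L fl h1]

theorem pvInner_norm (s : List Char) (i L : Int) (fl : Bool) (hi : 0 ≤ i) :
    pvNorm (pvInner s i L fl).1 = pvNorm s :=
  pvInner_norm_aux L (L - i).toNat s i fl (le_refl _) hi

theorem pvInner_flag_aux (L : Int) (n : Nat) :
    ∀ (s : List Char) (i : Int), (L - i).toNat ≤ n → 0 ≤ i →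
      (pvInner s i L true).2 = true := by
  induction n with
  | zero =>
    intro s i hn hi
    rw [pvInner_eq_stop s i L true (by omega)]
  | succ n ih =>
    intro s i hn hi
    by_cases h1 : i ≤ L - 2
    · set tok := PySem.List.slice (PySem.List.slice s (some i) none) none (some (2 : Int))
        with htok
      by_cases hk : tok ∈ keySet
      · rw [pvInner_eq_key s i L true hi h1 tok htok hk]
        exact ih (s.take i.toNat ++ PySem.Dict.getD ruleSet tok [] ++ s.drop (i.toNat + 2)) (i + 2) (by omega) (by omega)
      · rw [pvInner_eq_neg s i L true h1 tok htok hk]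
        exact ih s (i + 1) (by omega) (by omega)
    · rw [pvInner_eq_stop s i L true h1]

theorem pvInner_nochange_aux (L : Int) (n : Nat) :
    ∀ (s : List Char) (i : Int), (L - i).toNat ≤ n → 0 ≤ i →
      (pvInner s i L false).2 = false →
        (pvInner s i L false).1 = s ∧
        ∀ j : Int, i ≤ j → j ≤ L - 2 → ((s.drop j.toNat).take 2) ∉ keySet := by
  induction n with
  | zero =>
    intro s i hn hi hres
    rw [pvInner_eq_stop s i L false (by omega)]
    exact ⟨rfl, fun j hj1 hj2 => absurd (le_trans hj1 hj2) (by omega)⟩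
  | succ n ih =>
    intro s i hn hi hres
    by_cases h1 : i ≤ L - 2
    · set tok := PySem.List.slice (PySem.List.slice s (some i) none) none (some (2 : Int))
        with htok
      by_cases hk : tok ∈ keySet
      · exfalso
        rw [pvInner_eq_key s i L false hi h1 tok htok hk] at hres
        rw [pvInner_flag_aux L ((L - (i + 2)).toNat) _ (i + 2) (le_refl _) (by omega)] at hres
        simp at hres
      · rw [pvInner_eq_neg s i L false h1 tok htok hk] at hres ⊢
        obtain ⟨hu, hall⟩ := ih s (i + 1) (by omega) (by omega) hres
        refine ⟨hu, fun j hj1 hj2 => ?_⟩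
        rcases eq_or_lt_of_le hj1 with heq | hlt
        · rw [← heq]
          have htake : tok = (s.drop i.toNat).take 2 := by
            rw [htok, PySem.List.slice_from s hi, PySem.List.slice_to _ (by norm_num : (0:Int) ≤ 2)]
            rfl
          rw [← htake]
          exact hk
        · exact hall j (by omega) hj2
    · rw [pvInner_eq_stop s i L false h1]
      exact ⟨rfl, fun j hj1 hj2 => absurd (le_trans hj1 hj2) (by omega)⟩

theorem pvInner_nochange (s : List Char) (L : Int)
    (hres : (pvInner s 0 L false).2 = false) :
    (pvInner s 0 L false).1 = s ∧
    ∀ j : Int, 0 ≤ j → j ≤ L - 2 → ((s.drop j.toNat).take 2) ∉ keySet :=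
  pvInner_nochange_aux L (L - 0).toNat s 0 (le_refl _) (le_refl 0) hres

theorem pvCombine_none_iff (a c : Char) : pvCombine a c = none ↔ [a, c] ∉ keySet := by
  have hk : keySet = [['A','B'],['B','A'],['C','B'],['B','C'],['A','A'],['C','C']] := by decide
  rw [hk]
  simp only [pvCombine, List.mem_cons, List.not_mem_nil, or_false, List.cons.injEq, and_true]
  split_ifs with h1 h2 <;> simp <;> tauto

theorem pvKF_of_nopair (s : List Char) :
    (∀ j : Int, 0 ≤ j → j ≤ (s.length : Int) - 2 → ((s.drop j.toNat).take 2) ∉ keySet) →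
      pvKF s := by
  induction s with
  | nil => intro _; trivial
  | cons a rest ih =>
    intro h
    cases rest with
    | nil => trivial
    | cons c t =>
      constructor
      · rw [pvCombine_none_iff]
        have := h 0 (le_refl 0) (by simp; omega)
        simpa using this
      · apply ih
        intro j hj hj2
        have := h (j + 1) (by omega) (by simp at hj2 ⊢; omega)
        have hnat : (j + 1).toNat = j.toNat + 1 := by omega
        rw [hnat] at this
        simpa using this

theorem pvFoldl_kfree (s : List Char) : ∀ st : List Char, pvKF s →
    (∀ a c, st.head? = some a → s.head? = some c → pvCombine a c = none) →
    List.foldl pvPush st s = s.reverse ++ st := by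
  induction s with
  | nil => intro st _ _; simp
  | cons c s' ih =>
    intro st hkf hb
    have hpush : pvPush st c = c :: st := by
      cases st with
      | nil => rfl
      | cons a t =>
        rw [pvPush, hb a c rfl rfl]
    rw [List.foldl_cons, hpush, ih (c :: st) (pvKF_tail c s' hkf) ?_]
    · simp
    · intro a c' ha hc'
      cases s' with
      | nil => simp at hc'
      | cons x t =>
        simp at ha hc'
        rw [← ha, ← hc']
        exact hkf.1

theorem pvOuterFuel_spec : ∀ (n : Nat) (s : List Char), pvMu s < n →
    pvNorm (pvOuterFuel n s) = pvNorm s ∧ pvKF (pvOuterFuel n s) := by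
  intro n
  induction n with
  | zero => intro s h; omega
  | succ n ih =>
    intro s h
    simp only [pvOuterFuel]
    by_cases hr : (pvInner s 0 (s.length : Int) false).2 = true
    · rw [if_pos hr]
      have hmu := (pvInner_mu s 0 (s.length : Int) false (le_refl 0)).2 hr
      rcases hmu with hmu | hmu
      · exact absurd hmu (by simp)
      · have ih' := ih (pvInner s 0 (s.length : Int) false).1 (by omega)
        exact ⟨ih'.1.trans (pvInner_norm s 0 (s.length : Int) false (le_refl 0)), ih'.2⟩
    · rw [if_neg hr]
      have h2 : (pvInner s 0 (s.length : Int) false).2 = false := by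
        cases hb : (pvInner s 0 (s.length : Int) false).2
        · rfl
        · exact absurd hb hr
      obtain ⟨hu, hall⟩ := pvInner_nochange s (s.length : Int) h2
      rw [hu]
      exact ⟨rfl, pvKF_of_nopair s hall⟩

theorem pvOuter_spec (s : List Char) : pvNorm (pvOuter s) = pvNorm s ∧ pvKF (pvOuter s) :=
  pvOuterFuel_spec (pvMu s + 1) s (by omega)

-- ===== VERDICT (by name: the statement is the Claim_ definition above) =====
theorem applyRule_spec : Claim_equal_applyRule := by
  intro s _
  unfold Spec_applyRule applyRule applyRule_alt
  obtain ⟨hn, hkf⟩ := pvOuter_spec s.toList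
  have h3 : pvNorm (pvOuter s.toList) = (pvOuter s.toList).reverse := by
    have := pvFoldl_kfree (pvOuter s.toList) [] hkf (by intro a c ha _; simp at ha)
    simpa [pvNorm] using this
  have h4 : pvOuter s.toList = (pvNorm s.toList).reverse := by
    rw [← hn, h3, List.reverse_reverse]
  rw [h4]
  rfl
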